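-- pv_equiv track=rewrite | github.com/talasky/tennis-score | src/player.py | fancyFirstInits
-- ===== SOURCE A (Python) =====
-- def fancyFirstInits(firstName):
-- 	"""
-- 	Breaks a first name into initials. Handles hyphenated names.
-- 	@type firstName: string
-- 	@param firstName: Person's first name.
-- 	@rtype: string
-- 	@return: Initials corresponding to first name. Includes hyphens as needed.
-- 	"""
-- 	# May be other special case first names. Handle those when run into them, later version.
-- 	inits = ''
-- 	strings = firstName.split() # first, break into chunks by spaces
-- 	for word in strings:
-- 		if '-' in word: 		# handle hyphens
-- 			sub = word.split('-')
-- 			for s in sub[:-1]: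
-- 				inits += s[0]+".-"
-- 			inits+= sub[-1][0]+"."
-- 		else:
-- 			inits += word[0]+"."
-- 	return inits
-- ===== SOURCE B (Python) =====
-- def fancyFirstInits(firstName):
--     # Single character-level scan (state machine): no split() calls, no branch on
--     # whether a word contains a hyphen. A flag marks "at the start of an initial":
--     # whitespace arms it, a hyphen is copied through and re-arms it, and the first
--     # letter of each part is emitted with a trailing dot.
--     out = []
--     at_start = True
--     for c in firstName:
--         if c.isspace():
--             at_start = True
--         elif c == '-':
--             out.append('-')
--             at_start = True
--         elif at_start:
--             out.append(c + '.')
--             at_start = False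
--     return ''.join(out)
-- ===== Notes on version B (the rewrite author's own statement) =====
-- stated objective: alternative
-- what changed: Replaces A's two-level split (split() into words, then split('-') into parts) and its hyphen/non-hyphen conditional by a single character-level state-machine scan: a flag marks the start of an initial, whitespace arms it, hyphens are copied through and re-arm it, and the first letter of each part is emitted with a dot.
-- outside the precondition, e.g. on fancyFirstInits('-'): A raises IndexError, B returns '-'; on fancyFirstInits('a-'): A raises IndexError, B returns 'a.-'
import Mathlib
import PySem

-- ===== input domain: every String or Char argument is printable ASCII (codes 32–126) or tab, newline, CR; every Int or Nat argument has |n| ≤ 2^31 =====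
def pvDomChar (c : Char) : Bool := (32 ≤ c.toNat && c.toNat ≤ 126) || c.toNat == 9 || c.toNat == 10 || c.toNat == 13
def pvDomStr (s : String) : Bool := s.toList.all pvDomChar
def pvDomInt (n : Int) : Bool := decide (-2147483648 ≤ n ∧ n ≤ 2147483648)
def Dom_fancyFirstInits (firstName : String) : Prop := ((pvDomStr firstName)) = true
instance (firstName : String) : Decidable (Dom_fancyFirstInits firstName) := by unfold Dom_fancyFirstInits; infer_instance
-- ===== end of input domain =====

-- B replaces A's two-level split (words, then hyphen parts) and its hyphen/non-hyphen
-- branch by a single character-level scan with an "at start of an initial" flag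
-- (objective: alternative — one pass over characters, no split at all).

-- ===== PORT A =====
def fancyFirstInits (firstName : String) : String :=
  -- inits = ''
  -- strings = firstName.split()
  let inits : List Char := []
  let strings := PySem.Chars.split₀ firstName.toList
  String.ofList (strings.foldl (fun inits word =>
    if PySem.Chars.isIn ['-'] word then
      -- sub = word.split('-'); for s in sub[:-1]: inits += s[0]+".-"
      let sub := PySem.Chars.splitOn word ['-']
      let inits := (PySem.List.slice sub none (some (-1))).foldl
        (fun inits s => inits ++ [(PySem.List.pyGet? s 0).getD '?', '.', '-']) inits
      -- inits += sub[-1][0]+"."   (pyGet? = none is IndexError; excluded by Pre_)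
      inits ++ [(PySem.List.pyGet? ((PySem.List.pyGet? sub (-1)).getD []) 0).getD '?', '.']
    else
      -- inits += word[0]+"."
      inits ++ [(PySem.List.pyGet? word 0).getD '?', '.']) inits)

-- ===== PORT B =====
-- one loop iteration of B's scan: whitespace arms the flag, a hyphen is copied and
-- re-arms it, the first letter of a part is emitted with a dot
def pvStepB (st : List Char × Bool) (c : Char) : List Char × Bool :=
  if PySem.Chars.isspace c then (st.1, true)
  else if c = '-' then (st.1 ++ ['-'], true)
  else if st.2 then (st.1 ++ [c, '.'], false)
  else st

def fancyFirstInits_alt (firstName : String) : String :=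
  -- out = []; at_start = True; for c in firstName: …; return ''.join(out)
  String.ofList (firstName.toList.foldl pvStepB ([], true)).1

-- ===== PRECONDITION & SPEC =====
-- Pre_ excludes exactly the inputs where Python A raises IndexError: a word containing an
-- empty hyphen-part (A's s[0] / sub[-1][0] raise there).
def Pre_fancyFirstInits (firstName : String) : Prop :=
  ∀ w ∈ PySem.Chars.split₀ firstName.toList, ∀ s ∈ PySem.Chars.splitOn w ['-'], s ≠ []
instance (firstName : String) : Decidable (Pre_fancyFirstInits firstName) := by
  unfold Pre_fancyFirstInits; infer_instance
def pvWitness_fancyFirstInits : String := "Jean-Paul Marie"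

def Spec_fancyFirstInits (firstName : String) (out : String) : Prop := out = fancyFirstInits_alt firstName
instance (firstName : String) (out : String) : Decidable (Spec_fancyFirstInits firstName out) := by unfold Spec_fancyFirstInits; infer_instance

-- ===== CLAIM (what is proved, stated in full; the proofs are below) =====
def Claim_equal_fancyFirstInits : Prop := ∀ (firstName : String), Dom_fancyFirstInits firstName → Pre_fancyFirstInits firstName → Spec_fancyFirstInits firstName (fancyFirstInits firstName)

-- ===== LEMMAS AND PROOFS =====

-- the initials A produces for one word: '-'-joined list of first-letter+'.' of its hyphen parts
def pvWordInit (w : List Char) : List Char :=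
  PySem.Chars.join ['-'] ((PySem.Chars.splitOn w ['-']).map (fun s =>
    [(PySem.List.pyGet? s 0).getD '?', '.']))

-- Python's s[-1] is the last element (none ↔ empty list).
theorem pyGet?_neg_one {α : Type} (s : List α) : PySem.List.pyGet? s (-1) = s.getLast? := by
  cases s with
  | nil => rfl
  | cons x rest => simp [PySem.List.pyGet?, PySem.List.pyIdx?, List.getLast?_eq_getElem?]

-- splitOn never returns the empty list of pieces.
theorem splitOn_go_ne_nil (sep : List Char) (fuel : Nat) (l cur : List Char)
    (acc : List (List Char)) : PySem.Chars.splitOn.go sep fuel l cur acc ≠ [] := by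
  induction fuel generalizing l cur acc with
  | zero => simp [PySem.Chars.splitOn.go]
  | succ fuel ih =>
      cases l with
      | nil => simp [PySem.Chars.splitOn.go]
      | cons c rest =>
          rw [PySem.Chars.splitOn.go]
          split
          · exact ih _ _ _
          · exact ih _ _ _

theorem splitOn_ne_nil (s sep : List Char) : PySem.Chars.splitOn s sep ≠ [] :=
  splitOn_go_ne_nil sep _ s [] []

-- splitting on a character that does not occur yields the single piece back
theorem splitOn_go_not_mem (c : Char) (fuel : Nat) (l cur : List Char)
    (acc : List (List Char)) (h : c ∉ l) :
    PySem.Chars.splitOn.go [c] fuel l cur acc = acc.reverse ++ [cur.reverse ++ l] := by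
  induction fuel generalizing l cur with
  | zero => simp [PySem.Chars.splitOn.go]
  | succ fuel ih =>
      cases l with
      | nil => simp [PySem.Chars.splitOn.go]
      | cons x rest =>
          rw [PySem.Chars.splitOn.go]
          have hxc : x ≠ c := fun hx => h (by simp [hx])
          have hpre : [c].isPrefixOf (x :: rest) = false := by
            simp [List.isPrefixOf]; exact fun hx => absurd hx.symm hxc
          rw [hpre]
          simp only [Bool.false_eq_true, if_false,
            ih rest (x :: cur) (fun hm => h (List.mem_cons_of_mem _ hm))]
          simp

theorem splitOn_not_mem (w : List Char) (c : Char) (h : c ∉ w) :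
    PySem.Chars.splitOn w [c] = [w] := by
  rw [PySem.Chars.splitOn, splitOn_go_not_mem c _ w [] [] h]; rfl

-- splitOn.go only ever prepends to acc: pull the accumulator out front
theorem splitOn_go_acc (sep : List Char) (fuel : Nat) : ∀ (l cur : List Char)
    (acc : List (List Char)), PySem.Chars.splitOn.go sep fuel l cur acc
      = acc.reverse ++ PySem.Chars.splitOn.go sep fuel l cur [] := by
  induction fuel with
  | zero => intro l cur acc; simp [PySem.Chars.splitOn.go]
  | succ fuel ih =>
      intro l cur acc
      cases l with
      | nil => simp [PySem.Chars.splitOn.go]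
      | cons x rest =>
          rw [PySem.Chars.splitOn.go, PySem.Chars.splitOn.go]
          split
          · rw [ih _ _ (cur.reverse :: acc), ih _ _ [cur.reverse]]
            simp
          · rw [ih _ _ acc]

-- walking splitOn.go over a hyphen-free prefix just accumulates it
theorem splitOn_go_walk (p : List Char) : ∀ (f : Nat) (l cur : List Char)
    (acc : List (List Char)), ('-' : Char) ∉ p →
    PySem.Chars.splitOn.go ['-'] (p.length + f) (p ++ l) cur acc
      = PySem.Chars.splitOn.go ['-'] f l (p.reverse ++ cur) acc := by
  induction p with
  | nil => intro f l cur acc _; simp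
  | cons c t ih =>
      intro f l cur acc h
      have hc : c ≠ '-' := fun hx => h (by simp [hx])
      have : (c :: t).length + f = (t.length + f) + 1 := by simp; omega
      rw [this, List.cons_append, PySem.Chars.splitOn.go]
      have hpre : ['-'].isPrefixOf (c :: (t ++ l)) = false := by
        simp [List.isPrefixOf]; exact fun hx => absurd hx.symm hc
      rw [hpre]
      simp only [Bool.false_eq_true, if_false]
      rw [ih f l (c :: cur) acc (fun hm => h (List.mem_cons_of_mem _ hm))]
      simp

-- the first hyphen splits off the first piece
theorem splitOn_cons (p r : List Char) (h : ('-' : Char) ∉ p) :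
    PySem.Chars.splitOn (p ++ '-' :: r) ['-'] = p :: PySem.Chars.splitOn r ['-'] := by
  rw [PySem.Chars.splitOn]
  have hlen : (p ++ '-' :: r).length + 1 = p.length + (r.length + 2) := by simp; omega
  rw [hlen, splitOn_go_walk p (r.length + 2) ('-' :: r) [] [] h]
  rw [PySem.Chars.splitOn.go]
  have hpre : ['-'].isPrefixOf ('-' :: r) = true := by simp [List.isPrefixOf]
  rw [hpre]
  simp only [if_true]
  rw [splitOn_go_acc]
  simp [PySem.Chars.splitOn]

-- every char list with a hyphen splits at its first hyphen
theorem exists_first_hyphen (w : List Char) (h : ('-' : Char) ∈ w) :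
    ∃ p r, w = p ++ '-' :: r ∧ ('-' : Char) ∉ p := by
  induction w with
  | nil => cases h
  | cons c t ih =>
      by_cases hc : c = '-'
      · exact ⟨[], t, by simp [hc], by simp⟩
      · have ht : ('-' : Char) ∈ t := by
          cases h with
          | head => exact absurd rfl hc
          | tail _ hm => exact hm
        obtain ⟨p, r, hw, hp⟩ := ih ht
        exact ⟨c :: p, r, by simp [hw], by simp [hp]; exact fun hx => hc hx.symm⟩

-- A's ".-"-separated dropLast pass plus final piece IS '-'.join over all pieces
theorem dropLast_pass_eq_join (g : List Char → Char) (sub : List (List Char)) (h : sub ≠ []) :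
    sub.dropLast.flatMap (fun s => [g s, '.', '-']) ++ [g ((PySem.List.pyGet? sub (-1)).getD []), '.']
      = PySem.Chars.join ['-'] (sub.map (fun s => [g s, '.'])) := by
  induction sub with
  | nil => exact absurd rfl h
  | cons x rest ih =>
      cases rest with
      | nil => simp [pyGet?_neg_one, PySem.Chars.join_singleton]
      | cons y r =>
          have ih' := ih (by simp)
          rw [List.map_cons] at ih'
          rw [List.map_cons, List.map_cons, PySem.Chars.join_cons_cons, ← ih']
          simp [pyGet?_neg_one, List.getLast?_cons_cons]

-- per-word: A's branch body equals the per-word initials function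
theorem word_contrib_eq (w : List Char) :
    (if PySem.Chars.isIn ['-'] w then
      (PySem.List.slice (PySem.Chars.splitOn w ['-']) none (some (-1))).flatMap
          (fun s => [(PySem.List.pyGet? s 0).getD '?', '.', '-'])
        ++ [(PySem.List.pyGet? ((PySem.List.pyGet? (PySem.Chars.splitOn w ['-']) (-1)).getD []) 0).getD '?', '.']
      else [(PySem.List.pyGet? w 0).getD '?', '.'])
      = pvWordInit w := by
  unfold pvWordInit
  by_cases hmem : ('-' : Char) ∈ w
  · have hin : PySem.Chars.isIn ['-'] w = true := by
      rw [PySem.Chars.isIn_iff_infix, List.singleton_infix_iff]; exact hmem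
    rw [if_pos hin, PySem.List.slice_to_neg_one,
      dropLast_pass_eq_join _ _ (splitOn_ne_nil w ['-'])]
  · have hin : PySem.Chars.isIn ['-'] w = false := by
      rw [PySem.Chars.isIn_eq_false_iff, List.singleton_infix_iff]; exact hmem
    rw [if_neg (by simp [hin]), splitOn_not_mem w '-' hmem,
      List.map_singleton, PySem.Chars.join_singleton]

-- A computes the concatenation of the per-word initials
theorem A_eq_flatten (firstName : String) :
    fancyFirstInits firstName
      = String.ofList (((PySem.Chars.split₀ firstName.toList).map pvWordInit).flatten) := by
  simp only [fancyFirstInits]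
  apply congrArg
  rw [List.flatten_eq_flatMap]
  simp only [List.flatMap_map, id]
  conv_rhs => rw [← List.nil_append (List.flatMap _ _), ← PySem.List.foldl_append_eq_flatMap]
  apply PySem.List.foldl_congr_mem
  intro acc w _
  rw [PySem.List.foldl_append_eq_flatMap]
  have := word_contrib_eq w
  split
  · rename_i hin
    rw [if_pos hin] at this
    rw [List.append_assoc, this]
  · rename_i hin
    rw [if_neg hin] at this
    rw [this]

-- B's scan ignores further letters of a part
theorem stepB_noop (t : List Char) : ∀ (z : List Char),
    (∀ c ∈ t, PySem.Chars.isspace c = false ∧ c ≠ '-') →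
    t.foldl pvStepB (z, false) = (z, false) := by
  induction t with
  | nil => intro z _; rfl
  | cons c t ih =>
      intro z h
      have hc := h c (by simp)
      rw [List.foldl_cons]
      have : pvStepB (z, false) c = (z, false) := by
        simp [pvStepB, hc.1, hc.2]
      rw [this, ih z (fun d hd => h d (List.mem_cons_of_mem _ hd))]

-- B's scan over one hyphen-free nonempty part emits its initial and a dot
theorem stepB_part (p : List Char) (z : List Char) (hne : p ≠ [])
    (h : ∀ c ∈ p, PySem.Chars.isspace c = false ∧ c ≠ '-') :
    p.foldl pvStepB (z, true) = (z ++ [(PySem.List.pyGet? p 0).getD '?', '.'], false) := by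
  cases p with
  | nil => exact absurd rfl hne
  | cons c t =>
      have hc := h c (by simp)
      rw [List.foldl_cons]
      have : pvStepB (z, true) c = (z ++ [c, '.'], false) := by
        simp [pvStepB, hc.1, hc.2]
      rw [this, stepB_noop t _ (fun d hd => h d (List.mem_cons_of_mem _ hd))]
      simp [PySem.List.pyGet?, PySem.List.pyIdx?]

-- B's scan over one whole word (nonempty, whitespace-free, no empty hyphen part)
-- produces exactly A's per-word initials
theorem stepB_word : ∀ (n : Nat) (w : List Char), w.length ≤ n → ∀ (z : List Char),
    w ≠ [] → (∀ c ∈ w, PySem.Chars.isspace c = false) →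
    (∀ s ∈ PySem.Chars.splitOn w ['-'], s ≠ []) →
    w.foldl pvStepB (z, true) = (z ++ pvWordInit w, false) := by
  intro n
  induction n with
  | zero => intro w hlen z hne _ _; interval_cases h : w.length; simp_all
  | succ n ih =>
      intro w hlen z hne hws hparts
      by_cases hmem : ('-' : Char) ∈ w
      · obtain ⟨p, r, hw, hp⟩ := exists_first_hyphen w hmem
        subst hw
        have hsplit := splitOn_cons p r hp
        have hpne : p ≠ [] := hparts p (by rw [hsplit]; simp)
        have hrne : r ≠ [] := by
          intro hr
          subst hr
          have : ([] : List Char) ∈ PySem.Chars.splitOn (p ++ ['-']) ['-'] := by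
            rw [show p ++ ['-'] = p ++ '-' :: [] from rfl, splitOn_cons p [] hp]
            simp [PySem.Chars.splitOn, PySem.Chars.splitOn.go]
          exact hparts [] this rfl
        rw [List.foldl_append, stepB_part p z hpne (fun c hc =>
          ⟨hws c (by simp [hc]), fun hcd => hp (hcd ▸ hc)⟩)]
        rw [List.foldl_cons]
        have hhy : pvStepB (z ++ [(PySem.List.pyGet? p 0).getD '?', '.'], false) '-'
            = (z ++ [(PySem.List.pyGet? p 0).getD '?', '.'] ++ ['-'], true) := by
          simp [pvStepB]; decide
        rw [hhy]
        have hrlen : r.length ≤ n := by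
          simp only [List.length_append, List.length_cons] at hlen; omega
        rw [ih r hrlen _ hrne (fun c hc => hws c (by simp [hc]))
          (fun s hs => hparts s (by rw [hsplit]; exact List.mem_cons_of_mem _ hs))]
        unfold pvWordInit
        rw [hsplit, List.map_cons]
        have hmapne : (PySem.Chars.splitOn r ['-']).map (fun s =>
            [(PySem.List.pyGet? s 0).getD '?', '.']) ≠ [] := by
          simp [splitOn_ne_nil]
        cases hmap : (PySem.Chars.splitOn r ['-']).map (fun s =>
            [(PySem.List.pyGet? s 0).getD '?', '.']) with
        | nil => exact absurd hmap hmapne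
        | cons m ms =>
            rw [PySem.Chars.join_cons_cons]
            simp
      · rw [stepB_part w z hne (fun c hc => ⟨hws c hc, fun hcd => hmem (hcd ▸ hc)⟩)]
        unfold pvWordInit
        rw [splitOn_not_mem w '-' hmem, List.map_singleton, PySem.Chars.join_singleton]

-- split₀.go only ever prepends to acc: pull the accumulator out front
theorem split0_go_acc : ∀ (cs cur : List Char) (acc : List (List Char)),
    PySem.Chars.split₀.go cs cur acc
      = acc.reverse ++ PySem.Chars.split₀.go cs cur [] := by
  intro cs
  induction cs with
  | nil =>
      intro cur acc
      rw [PySem.Chars.split₀.go, PySem.Chars.split₀.go]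
      split <;> simp
  | cons c rest ih =>
      intro cur acc
      rw [PySem.Chars.split₀.go]
      conv_rhs => rw [PySem.Chars.split₀.go]
      split
      · split
        · exact ih [] acc
        · rw [ih [] (cur.reverse :: acc), ih [] [cur.reverse]]
          simp
      · exact ih (c :: cur) acc

-- the main invariant: B's scan over the rest of the string, starting from the state
-- reached after the (reversed) partial word cur, emits the initials of all words
-- that split₀.go still produces
theorem stepB_main : ∀ (cs cur z : List Char),
    (∀ c ∈ cur, PySem.Chars.isspace c = false) →
    (∀ w ∈ PySem.Chars.split₀.go cs cur [], ∀ s ∈ PySem.Chars.splitOn w ['-'], s ≠ []) →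
    (cs.foldl pvStepB (cur.reverse.foldl pvStepB (z, true))).1
      = z ++ ((PySem.Chars.split₀.go cs cur []).map pvWordInit).flatten := by
  intro cs
  induction cs with
  | nil =>
      intro cur z hcur hpre
      rw [PySem.Chars.split₀.go]
      cases hc : cur.isEmpty
      · simp only [Bool.false_eq_true, if_false]
        have hne : cur.reverse ≠ [] := by
          simp at hc; simp [hc]
        rw [List.foldl_nil, stepB_word cur.reverse.length cur.reverse le_rfl z hne
          (fun c hcm => hcur c (by simpa using hcm))
          (hpre cur.reverse (by rw [PySem.Chars.split₀.go, hc]; simp))]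
        simp
      · simp only [if_true]
        have : cur = [] := by simpa [List.isEmpty_iff] using hc
        subst this
        simp
  | cons c rest ih =>
      intro cur z hcur hpre
      rw [PySem.Chars.split₀.go]
      by_cases hsp : PySem.Chars.isspace c = true
      · simp only [hsp, if_true]
        cases hc : cur.isEmpty
        · simp only [Bool.false_eq_true, if_false]
          have hne : cur.reverse ≠ [] := by
            simp at hc; simp [hc]
          have hmem0 : cur.reverse ∈ PySem.Chars.split₀.go rest [] [cur.reverse] := by
            rw [split0_go_acc]; simp
          have hpre' : ∀ w ∈ PySem.Chars.split₀.go rest [] [cur.reverse],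
              ∀ s ∈ PySem.Chars.splitOn w ['-'], s ≠ [] := by
            rw [PySem.Chars.split₀.go] at hpre
            simpa [hsp, hc] using hpre
          rw [List.foldl_cons,
            stepB_word cur.reverse.length cur.reverse le_rfl z hne
              (fun d hd => hcur d (by simpa using hd)) (hpre' cur.reverse hmem0)]
          have hstep : pvStepB (z ++ pvWordInit cur.reverse, false) c
              = (z ++ pvWordInit cur.reverse, true) := by simp [pvStepB, hsp]
          rw [hstep]
          have := ih [] (z ++ pvWordInit cur.reverse) (by simp)
            (fun w hw s hs => hpre' w (by rw [split0_go_acc]; simp [hw]) s hs)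
          simp only [List.reverse_nil, List.foldl_nil] at this
          rw [this, split0_go_acc rest [] [cur.reverse]]
          simp
        · simp only [if_true]
          have hcnil : cur = [] := by simpa [List.isEmpty_iff] using hc
          subst hcnil
          rw [PySem.Chars.split₀.go, if_pos (by simp [hsp])] at hpre
          simp only [List.isEmpty_nil, if_true] at hpre
          have := ih [] z (by simp) hpre
          simp only [List.reverse_nil, List.foldl_nil] at this ⊢
          rw [List.foldl_cons]
          have hstep : pvStepB (z, true) c = (z, true) := by simp [pvStepB, hsp]
          rw [hstep, this]
      · simp only [hsp, Bool.false_eq_true, if_false]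
        have hpre' := hpre
        rw [PySem.Chars.split₀.go, if_neg (by simp [hsp])] at hpre'
        have := ih (c :: cur) z
          (by intro d hd; cases hd with
              | head => simpa using hsp
              | tail _ hm => exact hcur d hm) hpre'
        rw [List.foldl_cons,
          show pvStepB (List.foldl pvStepB (z, true) cur.reverse) c
              = List.foldl pvStepB (z, true) (c :: cur).reverse from by
            rw [List.reverse_cons, List.foldl_append]; rfl]
        exact this

-- ===== VERDICT (by name: the statement is the Claim_ definition above) =====
theorem fancyFirstInits_spec : Claim_equal_fancyFirstInits := by
  intro firstName _ hpre
  show fancyFirstInits firstName = fancyFirstInits_alt firstName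
  rw [A_eq_flatten]
  simp only [fancyFirstInits_alt]
  apply congrArg
  have := stepB_main firstName.toList [] [] (by simp) hpre
  simp only [List.reverse_nil, List.foldl_nil] at this
  rw [this]
  rfl
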